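-- pv_equiv track=rewrite | github.com/eehab-saadat/QueryBuilder-2.0 | Backend/parser/parser_util.py | break_into_subqueries
-- ===== SOURCE A (Python) =====
-- def break_into_subqueries(full_query, exclude_brackets=True) -> list[str]:
--     """
--     Extract all subqueries by recursively checking for SELECT blocks.
--
--     Args:
--         full_query (str): The complete SQL query.
--         exclude_brackets (bool): Whether to exclude brackets from the extracted subqueries.
--
--     Returns:
--         list[str]: A list of subqueries.
--     """
--     stack = []
--     substrings = []
--     current_substring_start = None
--
--     for i, char in enumerate(full_query):
--         if char == '(':
--             stack.append(i)
--             if len(stack) == 1: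
--                 current_substring_start = i  # Start of a new substring
--         elif char == ')':
--             if stack:
--                 stack.pop()
--                 if len(stack) == 0 and current_substring_start is not None:
--                     if exclude_brackets:
--                         queries = full_query[current_substring_start + 1:i].split("INTERSECT")
--                         # substrings.append(
--                         #     )
--                         substrings.extend(queries)
--                     else:
--                         queries = full_query[current_substring_start:i + 1].split("INTERSECT")
--                         substrings.extend(queries)
--                         # substrings.append(
--                         #     full_query[current_substring_start:i + 1])
--                     current_substring_start = None  # Reset start
--                     if exclude_brackets:
--                         substrings.extend(
--                             break_into_subqueries(substrings[-1]))
--                     else: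
--                         substrings.extend(
--                             break_into_subqueries(substrings[-1][1:-1]))
--
--     return substrings
-- ===== SOURCE B (Python) =====
-- def break_into_subqueries(full_query, exclude_brackets=True) -> list[str]:
--     """Iterative version: an explicit work-stack of (text, exclude flag) frames
--     replaces the recursive self-call; each frame is scanned once up to its first
--     top-level '(...)' group, whose pieces are emitted and whose last piece (and
--     the frame's remainder) become new frames."""
--     result = []
--     work = [(full_query, exclude_brackets)]
--     while work:
--         text, excl = work.pop()
--         depth = 0
--         start = None
--         for i, ch in enumerate(text):
--             if ch == '(':
--                 depth += 1
--                 if depth == 1: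
--                     start = i
--             elif ch == ')' and depth:
--                 depth -= 1
--                 if depth == 0:
--                     if excl:
--                         pieces = text[start + 1:i].split("INTERSECT")
--                         sub = pieces[-1]
--                     else:
--                         pieces = text[start:i + 1].split("INTERSECT")
--                         sub = pieces[-1][1:-1]
--                     result.extend(pieces)
--                     work.append((text[i + 1:], excl))
--                     work.append((sub, True))
--                     break
--     return result
-- ===== Notes on version B (the rewrite author's own statement) =====
-- stated objective: alternative
-- what changed: Replaced A's recursion (a self-call inside the scanning loop) by an explicit work-stack of (text, exclude-flag) frames processed depth-first, each frame scanned only up to its first top-level bracket group, whose remainder and last piece are pushed as new frames.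
import Mathlib
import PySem

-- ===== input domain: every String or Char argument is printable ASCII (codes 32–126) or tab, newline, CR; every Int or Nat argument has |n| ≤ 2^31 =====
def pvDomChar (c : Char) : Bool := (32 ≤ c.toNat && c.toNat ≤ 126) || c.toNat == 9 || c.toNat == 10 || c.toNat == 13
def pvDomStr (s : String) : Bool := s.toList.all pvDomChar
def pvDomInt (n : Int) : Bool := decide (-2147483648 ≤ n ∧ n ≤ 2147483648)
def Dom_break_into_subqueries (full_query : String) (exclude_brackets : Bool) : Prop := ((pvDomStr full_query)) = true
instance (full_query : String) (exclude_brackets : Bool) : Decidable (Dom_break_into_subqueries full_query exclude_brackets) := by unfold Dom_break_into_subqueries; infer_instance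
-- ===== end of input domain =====

-- B replaces A's recursive self-call by an explicit work-stack of (text, exclude) frames,
-- each frame being scanned only up to its first top-level '(...)' group (objective: alternative decomposition).

-- the separator "INTERSECT" both Pythons split on
def pvSep : List Char := ['I', 'N', 'T', 'E', 'R', 'S', 'E', 'C', 'T']

-- ---- facts cited by the termination arguments of the ports (decreasing_by) ----

theorem pvGo_ne_nil (sep : List Char) :
    ∀ (fuel : Nat) (l cur : List Char) (acc : List (List Char)),
      PySem.Chars.splitOn.go sep fuel l cur acc ≠ [] := by
  intro fuel
  induction fuel with
  | zero => intro l cur acc; simp [PySem.Chars.splitOn.go]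
  | succ n ih =>
    intro l cur acc
    cases l with
    | nil => simp [PySem.Chars.splitOn.go]
    | cons c rest =>
      rw [PySem.Chars.splitOn.go]
      split
      · exact ih _ _ _
      · exact ih _ _ _

theorem pvSplitOn_ne_nil (s sep : List Char) : PySem.Chars.splitOn s sep ≠ [] :=
  pvGo_ne_nil sep (s.length + 1) s [] []

theorem pvGo_mem_length (sep : List Char) :
    ∀ (fuel : Nat) (l cur : List Char) (acc : List (List Char)) (p : List Char),
      p ∈ PySem.Chars.splitOn.go sep fuel l cur acc → p ∈ acc ∨ p.length ≤ cur.length + l.length := by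
  intro fuel
  induction fuel with
  | zero =>
    intro l cur acc p hp
    simp [PySem.Chars.splitOn.go] at hp
    rcases hp with h | h
    · left; exact h
    · right; simp [h]
  | succ n ih =>
    intro l cur acc p hp
    cases l with
    | nil =>
      simp [PySem.Chars.splitOn.go] at hp
      rcases hp with h | h
      · left; exact h
      · right; simp [h]
    | cons c rest =>
      rw [PySem.Chars.splitOn.go] at hp
      split at hp
      · rcases ih _ _ _ _ hp with h | h
        · rcases List.mem_cons.mp h with h' | h'
          · right; simp [h']
          · left; exact h'
        · right
          have := List.length_drop (l := c :: rest) (i := sep.length)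
          simp at h ⊢
          omega
      · rcases ih _ _ _ _ hp with h | h
        · left; exact h
        · right; simp at h ⊢; omega

theorem pvMem_splitOn_length {p s sep : List Char} (h : p ∈ PySem.Chars.splitOn s sep) :
    p.length ≤ s.length := by
  rcases pvGo_mem_length sep (s.length + 1) s [] [] p h with h' | h'
  · simp at h'
  · simpa using h'

/-- the last piece of a split is at most as long as what was split -/
theorem pvLastPiece_le (c sep : List Char) :
    (((PySem.Chars.splitOn c sep).getLast?).getD []).length ≤ c.length := by
  cases h : (PySem.Chars.splitOn c sep).getLast? with
  | none => simp
  | some p =>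
    have hm : p ∈ PySem.Chars.splitOn c sep := List.mem_of_getLast? h
    simpa using pvMem_splitOn_length hm

/-- the last element of `subs ++ queries` ignores `subs` when `queries` came from a split -/
theorem pvGetLast_append_splitOn (subs : List (List Char)) (c sep : List Char) :
    (subs ++ PySem.Chars.splitOn c sep).getLast? = (PySem.Chars.splitOn c sep).getLast? := by
  rw [List.getLast?_append]
  cases h : (PySem.Chars.splitOn c sep).getLast? with
  | none => exact absurd (List.getLast?_eq_none_iff.mp h) (pvSplitOn_ne_nil c sep)
  | some p => simp

theorem pvSliceNat_len_le (s : List Char) (a b : Nat) :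
    (PySem.List.slice s (some (a : Int)) (some (b : Int))).length ≤ b - a := by
  rw [PySem.List.slice_natCast]
  simp

theorem pvSlice_one_negone_len (l : List Char) :
    (PySem.List.slice l (some 1) (some (-1))).length ≤ l.length - 1 := by
  have h := PySem.List.length_slice (xs := l) (a := (1:Int)) (b := (-1:Int))
  rw [h]
  simp

/-- the string A recurses on is strictly shorter than the scanned string -/
theorem pvRecArg_len_lt (s : List Char) (excl : Bool) (i start : Nat) (subs : List (List Char))
    (h0 : i < s.length) :
    (let queries :=
        if excl then
          PySem.Chars.splitOn (PySem.List.slice s (some ((start + 1 : Nat) : Int)) (some ((i : Nat) : Int))) pvSep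
        else
          PySem.Chars.splitOn (PySem.List.slice s (some ((start : Nat) : Int)) (some ((i + 1 : Nat) : Int))) pvSep
      let lastq := (PySem.List.pyGet? (subs ++ queries) (-1)).getD []
      (if excl then lastq else PySem.List.slice lastq (some 1) (some (-1))).length) < s.length := by
  dsimp only
  cases excl with
  | true =>
    simp only [if_true, PySem.List.pyGet?_neg_one, pvGetLast_append_splitOn]
    have h1 := pvLastPiece_le (PySem.List.slice s (some ((start + 1 : Nat) : Int)) (some ((i : Nat) : Int))) pvSep
    have h2 := pvSliceNat_len_le s (start + 1) i
    omega
  | false =>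
    simp only [Bool.false_eq_true, if_false, PySem.List.pyGet?_neg_one, pvGetLast_append_splitOn]
    have h1 := pvLastPiece_le (PySem.List.slice s (some ((start : Nat) : Int)) (some ((i + 1 : Nat) : Int))) pvSep
    have h2 := pvSliceNat_len_le s start (i + 1)
    have h3 := pvSlice_one_negone_len (((PySem.Chars.splitOn (PySem.List.slice s (some ((start : Nat) : Int)) (some ((i + 1 : Nat) : Int))) pvSep).getLast?).getD [])
    omega

-- ===== PORT A =====
-- A, transliterated over `List Char`; the `for i, char in enumerate(full_query)` loop is
-- `pyALoop` (index `i`, `stack` of indices, `cur` = current_substring_start, `subs` = substrings),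
-- and the recursive self-call is `pyA`.
-- A, transliterated over `List Char`: the `for i, char in enumerate(full_query)` loop is
-- `pyALoop` (index `i`, `stack` of indices, `cur` = current_substring_start, `subs` = substrings);
-- A's recursive self-call `break_into_subqueries(substrings[-1])` is the loop restarted from its
-- initial state on the shorter string (`pyALoop recArg true 0 [] none []`), and `pyA` is that
-- initial state.
def pyALoop (s : List Char) (excl : Bool) (i : Nat) (stack : List Nat)
    (cur : Option Nat) (subs : List (List Char)) : List (List Char) :=
  if h : i < s.length then
    if s[i] = '(' then
      let stack' := stack ++ [i]
      pyALoop s excl (i + 1) stack' (if stack'.length = 1 then some i else cur) subs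
    else if s[i] = ')' then
      if stack.isEmpty then
        pyALoop s excl (i + 1) stack cur subs
      else
        let stack' := stack.dropLast
        if stack'.length = 0 then
          match cur with
          | some start =>
            let queries :=
              if excl then
                PySem.Chars.splitOn (PySem.List.slice s (some ((start + 1 : Nat) : Int)) (some ((i : Nat) : Int))) pvSep
              else
                PySem.Chars.splitOn (PySem.List.slice s (some ((start : Nat) : Int)) (some ((i + 1 : Nat) : Int))) pvSep
            let subs' := subs ++ queries
            let lastq := (PySem.List.pyGet? subs' (-1)).getD []   -- substrings[-1]; the list is never empty here
            let recArg := if excl then lastq else PySem.List.slice lastq (some 1) (some (-1))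
            pyALoop s excl (i + 1) stack' none (subs' ++ pyALoop recArg true 0 [] none [])
          | none => pyALoop s excl (i + 1) stack' cur subs
        else
          pyALoop s excl (i + 1) stack' cur subs
    else
      pyALoop s excl (i + 1) stack cur subs
  else
    subs
termination_by (s.length, s.length - i)
decreasing_by
  · exact Prod.Lex.right _ (Nat.sub_succ_lt_self s.length i h)
  · exact Prod.Lex.right _ (Nat.sub_succ_lt_self s.length i h)
  · exact Prod.Lex.left _ _ (pvRecArg_len_lt s excl i start subs h)
  · exact Prod.Lex.right _ (Nat.sub_succ_lt_self s.length i h)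
  · exact Prod.Lex.right _ (Nat.sub_succ_lt_self s.length i h)
  · exact Prod.Lex.right _ (Nat.sub_succ_lt_self s.length i h)
  · exact Prod.Lex.right _ (Nat.sub_succ_lt_self s.length i h)

def pyA (s : List Char) (excl : Bool) : List (List Char) :=
  pyALoop s excl 0 [] none []

def break_into_subqueries (full_query : String) (exclude_brackets : Bool) : List String :=
  (pyA full_query.toList exclude_brackets).map String.ofList

-- ===== PORT B =====
-- B, transliterated: `scanB` is the inner `for` loop of one frame (returns the pieces of the
-- first top-level group, the sub-frame text, and the index of the closing bracket; `none` if
-- the frame has no group), `runB` is the `while work:` loop with its explicit stack.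
def scanB (text : List Char) (excl : Bool) (i : Nat) (depth : Nat) (start : Option Nat) :
    Option (List (List Char) × List Char × Nat) :=
  if h : i < text.length then
    if text[i] = '(' then
      scanB text excl (i + 1) (depth + 1) (if depth = 0 then some i else start)
    else if text[i] = ')' ∧ depth ≠ 0 then
      if depth - 1 = 0 then
        match start with
        | some st =>
          let pieces :=
            if excl then
              PySem.Chars.splitOn (PySem.List.slice text (some ((st + 1 : Nat) : Int)) (some ((i : Nat) : Int))) pvSep
            else
              PySem.Chars.splitOn (PySem.List.slice text (some ((st : Nat) : Int)) (some ((i + 1 : Nat) : Int))) pvSep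
          let sub :=
            if excl then (PySem.List.pyGet? pieces (-1)).getD []
            else PySem.List.slice ((PySem.List.pyGet? pieces (-1)).getD []) (some 1) (some (-1))
          some (pieces, sub, i)
        | none => none   -- unreachable: start is set whenever depth returns to 0 (Python would raise here)
      else
        scanB text excl (i + 1) (depth - 1) start
    else
      scanB text excl (i + 1) depth start
  else
    none
termination_by text.length - i
decreasing_by
  · exact Nat.sub_succ_lt_self text.length i h
  · exact Nat.sub_succ_lt_self text.length i h
  · exact Nat.sub_succ_lt_self text.length i h

theorem pvSlice_one_negone_len2 (l : List Char) :
    (PySem.List.slice l (some 1) (some (-1))).length ≤ l.length - 2 := by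
  have h := PySem.List.length_slice (xs := l) (a := (1:Int)) (b := (-1:Int))
  rw [h]
  simp only [PySem.List.clampIdx]
  split_ifs <;> simp_all <;> omega

theorem pvScanB_spec (text : List Char) (excl : Bool) :
    ∀ (k i depth : Nat) (start : Option Nat) (p : List (List Char)) (sub : List Char) (ic : Nat),
      text.length ≤ i + k →
      (depth ≠ 0 → ∃ st, start = some st ∧ st < i) →
      scanB text excl i depth start = some (p, sub, ic) →
      i ≤ ic ∧ ic < text.length ∧ sub.length < ic := by
  intro k
  induction k with
  | zero =>
    intro i depth start p sub ic hk hinv hscan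
    rw [scanB.eq_def] at hscan
    rw [dif_neg (by omega)] at hscan
    exact absurd hscan (by simp)
  | succ n ih =>
    intro i depth start p sub ic hk hinv hscan
    rw [scanB.eq_def] at hscan
    by_cases hi : i < text.length
    case neg => rw [dif_neg hi] at hscan; exact absurd hscan (by simp)
    rw [dif_pos hi] at hscan
    by_cases hpar : text[i] = '('
    · rw [if_pos hpar] at hscan
      have hinv' : depth + 1 ≠ 0 → ∃ st, (if depth = 0 then some i else start) = some st ∧ st < i + 1 := by
        intro _
        by_cases hd : depth = 0
        · exact ⟨i, if_pos hd, by omega⟩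
        · obtain ⟨st, hst, hlt⟩ := hinv hd
          exact ⟨st, by rw [if_neg hd]; exact hst, by omega⟩
      have h := ih (i + 1) (depth + 1) _ p sub ic (by omega) hinv' hscan
      omega
    rw [if_neg hpar] at hscan
    by_cases hclo : text[i] = ')' ∧ depth ≠ 0
    · rw [if_pos hclo] at hscan
      by_cases hdz : depth - 1 = 0
      · rw [if_pos hdz] at hscan
        obtain ⟨st, hst, hlt⟩ := hinv hclo.2
        subst hst
        dsimp only at hscan
        injection hscan with h
        have hp : ic = i := (congrArg (fun t => t.2.2) h).symm
        have hs : sub = (if excl then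
            (PySem.List.pyGet? (PySem.Chars.splitOn (PySem.List.slice text (some ((st + 1 : Nat) : Int)) (some ((i : Nat) : Int))) pvSep) (-1)).getD []
          else
            PySem.List.slice ((PySem.List.pyGet? (PySem.Chars.splitOn (PySem.List.slice text (some ((st : Nat) : Int)) (some ((i + 1 : Nat) : Int))) pvSep) (-1)).getD []) (some 1) (some (-1))) := by
          cases excl
          · exact (congrArg (fun t => t.2.1) h).symm
          · exact (congrArg (fun t => t.2.1) h).symm
        subst hp
        refine ⟨le_refl _, hi, ?_⟩
        rw [hs]
        cases excl
        · -- excl = false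
          simp only [Bool.false_eq_true, if_false]
          have h1 := pvLastPiece_le (PySem.List.slice text (some ((st : Nat) : Int)) (some ((ic + 1 : Nat) : Int))) pvSep
          have h2 := pvSliceNat_len_le text st (ic + 1)
          have h3 := pvSlice_one_negone_len2 (((PySem.Chars.splitOn (PySem.List.slice text (some ((st : Nat) : Int)) (some ((ic + 1 : Nat) : Int))) pvSep).getLast?).getD [])
          simp only [PySem.List.pyGet?_neg_one]
          omega
        · -- excl = true
          simp only [if_true]
          have h1 := pvLastPiece_le (PySem.List.slice text (some ((st + 1 : Nat) : Int)) (some ((ic : Nat) : Int))) pvSep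
          have h2 := pvSliceNat_len_le text (st + 1) ic
          simp only [PySem.List.pyGet?_neg_one]
          omega
      · rw [if_neg hdz] at hscan
        have h := ih (i + 1) (depth - 1) start p sub ic (by omega) (by
          intro _
          obtain ⟨st, hst, hlt⟩ := hinv hclo.2
          exact ⟨st, hst, by omega⟩) hscan
        omega
    · rw [if_neg hclo] at hscan
      have h := ih (i + 1) depth start p sub ic (by omega) (by
        intro hd
        obtain ⟨st, hst, hlt⟩ := hinv hd
        exact ⟨st, hst, by omega⟩) hscan
      omega

theorem pvScanB_spec0 (text : List Char) (excl : Bool) (p : List (List Char)) (sub : List Char)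
    (ic : Nat) (h : scanB text excl 0 0 none = some (p, sub, ic)) :
    ic < text.length ∧ sub.length < ic := by
  have h' := pvScanB_spec text excl text.length 0 0 none p sub ic (by omega) (by simp) h
  exact ⟨h'.2.1, h'.2.2⟩

def runB (work : List (List Char × Bool)) (result : List (List Char)) : List (List Char) :=
  match work with
  | [] => result
  | (text, excl) :: rest =>
    match hscan : scanB text excl 0 0 none with
    | none => runB rest result
    | some (pieces, sub, ic) =>
      runB ((sub, true) :: (PySem.List.slice text (some ((ic : Int) + 1)) none, excl) :: rest)
        (result ++ pieces)
termination_by (work.map (fun f => f.1.length + 1)).sum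
decreasing_by
  · simp
  · obtain ⟨h2, h3⟩ := pvScanB_spec0 text excl pieces sub ic hscan
    have hsuf : PySem.List.slice text (some ((ic : Int) + 1)) none = text.drop (ic + 1) := by
      have hc : ((ic : Int) + 1) = ((ic + 1 : Nat) : Int) := by push_cast; ring
      rw [hc, PySem.List.slice_from_natCast]
    simp [hsuf]
    omega

def break_into_subqueries_alt (full_query : String) (exclude_brackets : Bool) : List String :=
  (runB [(full_query.toList, exclude_brackets)] []).map String.ofList

-- ===== PRECONDITION & SPEC =====
def Spec_break_into_subqueries (full_query : String) (exclude_brackets : Bool) (out : List String) : Prop := out = break_into_subqueries_alt full_query exclude_brackets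
instance (full_query : String) (exclude_brackets : Bool) (out : List String) : Decidable (Spec_break_into_subqueries full_query exclude_brackets out) := by unfold Spec_break_into_subqueries; infer_instance

-- ===== CLAIM (what is proved, stated in full; the proofs are below) =====
def Claim_equal_break_into_subqueries : Prop := ∀ (full_query : String) (exclude_brackets : Bool), Dom_break_into_subqueries full_query exclude_brackets → Spec_break_into_subqueries full_query exclude_brackets (break_into_subqueries full_query exclude_brackets)


-- ===== LEMMAS AND PROOFS =====

theorem pvGetLast_append_ne_nil {α : Type} (a q : List α) (h : q ≠ []) :
    (a ++ q).getLast? = q.getLast? := by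
  rw [List.getLast?_append]
  cases hq : q.getLast? with
  | none => exact absurd (List.getLast?_eq_none_iff.mp hq) h
  | some p => simp

/-- the per-frame meaning of B's work-stack loop: pieces of the first group,
then (recursively) the frames it pushes -/
def pvF (t : List Char) (e : Bool) : List (List Char) :=
  match hscan : scanB t e 0 0 none with
  | none => []
  | some (p, sub, ic) =>
    p ++ pvF sub true ++ pvF (PySem.List.slice t (some ((ic : Int) + 1)) none) e
termination_by t.length
decreasing_by
  · have := pvScanB_spec0 t e p sub ic hscan; omega
  · have h := pvScanB_spec0 t e p sub ic hscan
    have hc : ((ic : Int) + 1) = ((ic + 1 : Nat) : Int) := by push_cast; ring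
    rw [hc, PySem.List.slice_from_natCast]
    simp
    omega

theorem pvF_none {t : List Char} {e : Bool} (h : scanB t e 0 0 none = none) : pvF t e = [] := by
  rw [pvF.eq_def]
  split <;> simp_all

theorem pvF_some {t : List Char} {e : Bool} {p : List (List Char)} {sub : List Char} {ic : Nat}
    (h : scanB t e 0 0 none = some (p, sub, ic)) :
    pvF t e = p ++ pvF sub true ++ pvF (PySem.List.slice t (some ((ic : Int) + 1)) none) e := by
  rw [pvF.eq_def]
  split <;> simp_all

theorem pvRunB_eq : ∀ (work : List (List Char × Bool)) (result : List (List Char)),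
    runB work result = result ++ (work.map (fun f => pvF f.1 f.2)).flatten := by
  intro work result
  induction work, result using runB.induct with
  | case1 result => simp [runB]
  | case2 result text excl rest hscan ih =>
    rw [runB.eq_def]
    dsimp only
    split
    next heq => rw [ih]; simp [pvF_none heq]
    next p' s' i' heq => rw [hscan] at heq; cases heq
  | case3 result text excl rest pieces sub ic hscan ih =>
    rw [runB.eq_def]
    dsimp only
    split
    next heq => rw [hscan] at heq; cases heq
    next p' s' i' heq =>
      rw [hscan] at heq
      injection heq with heq
      rw [show p' = pieces from (congrArg (fun t => t.1) heq).symm,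
          show s' = sub from (congrArg (fun t => t.2.1) heq).symm,
          show i' = ic from (congrArg (fun t => t.2.2) heq).symm]
      rw [ih]
      simp [pvF_some hscan]

theorem pvALoop_append (s : List Char) (e : Bool) :
    ∀ (k i : Nat) (stack : List Nat) (cur : Option Nat) (a b : List (List Char)),
      s.length ≤ i + k →
      pyALoop s e i stack cur (a ++ b) = a ++ pyALoop s e i stack cur b := by
  intro k
  induction k with
  | zero =>
    intro i stack cur a b hk
    conv_lhs => rw [pyALoop.eq_def]
    conv_rhs => rw [pyALoop.eq_def]
    simp only [dif_neg (show ¬ i < s.length by omega)]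
  | succ n ih =>
    intro i stack cur a b hk
    by_cases hi : i < s.length
    case neg =>
      conv_lhs => rw [pyALoop.eq_def]
      conv_rhs => rw [pyALoop.eq_def]
      simp only [dif_neg hi]
    conv_lhs => rw [pyALoop.eq_def]
    conv_rhs => rw [pyALoop.eq_def]
    simp only [dif_pos hi]
    by_cases hpar : s[i] = '('
    · simp only [if_pos hpar]
      exact ih (i + 1) _ _ a b (by omega)
    simp only [if_neg hpar]
    by_cases hclo : s[i] = ')'
    · simp only [if_pos hclo]
      by_cases hemp : stack.isEmpty
      · simp only [if_pos hemp]
        exact ih (i + 1) _ _ a b (by omega)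
      simp only [if_neg hemp]
      by_cases hlen : stack.dropLast.length = 0
      · simp only [if_pos hlen]
        cases cur with
        | none => exact ih (i + 1) _ _ a b (by omega)
        | some start =>
          simp only [PySem.List.pyGet?_neg_one]
          have hqne : (if e = true then
              PySem.Chars.splitOn (PySem.List.slice s (some ((start + 1 : Nat) : Int)) (some ((i : Nat) : Int))) pvSep
            else
              PySem.Chars.splitOn (PySem.List.slice s (some ((start : Nat) : Int)) (some ((i + 1 : Nat) : Int))) pvSep) ≠ [] := by
            split
            · exact pvSplitOn_ne_nil _ _
            · exact pvSplitOn_ne_nil _ _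
          rw [pvGetLast_append_ne_nil (a ++ b) _ hqne, pvGetLast_append_ne_nil b _ hqne]
          rw [show ∀ (q r : List (List Char)), ((a ++ b) ++ q) ++ r = a ++ ((b ++ q) ++ r) by
            intro q r; simp [List.append_assoc]]
          exact ih (i + 1) _ _ a _ (by omega)
      · simp only [if_neg hlen]
        exact ih (i + 1) _ _ a b (by omega)
    · simp only [if_neg hclo]
      exact ih (i + 1) _ _ a b (by omega)


theorem pvALoop_factor (s : List Char) (e : Bool) (i : Nat) (stack : List Nat)
    (cur : Option Nat) (subs : List (List Char)) :
    pyALoop s e i stack cur subs = subs ++ pyALoop s e i stack cur [] := by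
  have h := pvALoop_append s e s.length i stack cur subs [] (by omega)
  rwa [List.append_nil] at h

theorem pvSlice_shift (s : List Char) (j a b : Nat) :
    PySem.List.slice (s.drop j) (some ((a : Nat) : Int)) (some ((b : Nat) : Int)) =
      PySem.List.slice s (some ((j + a : Nat) : Int)) (some ((j + b : Nat) : Int)) := by
  rw [PySem.List.slice_natCast, PySem.List.slice_natCast, List.drop_drop]
  congr 1
  omega

theorem pvALoop_shift (s : List Char) (e : Bool) (j : Nat) :
    ∀ (k i : Nat) (stack : List Nat) (cur : Option Nat),
      s.length ≤ j + i + k →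
      pyALoop s e (j + i) (stack.map (· + j)) (cur.map (· + j)) [] =
        pyALoop (s.drop j) e i stack cur [] := by
  intro k
  induction k with
  | zero =>
    intro i stack cur hk
    conv_lhs => rw [pyALoop.eq_def]
    conv_rhs => rw [pyALoop.eq_def]
    rw [dif_neg (by omega), dif_neg (by simp; omega)]
  | succ n ih =>
    intro i stack cur hk
    by_cases hi : i < (s.drop j).length
    case neg =>
      conv_lhs => rw [pyALoop.eq_def]
      conv_rhs => rw [pyALoop.eq_def]
      rw [dif_neg (by simp at hi ⊢; omega), dif_neg hi]
    have hji : j + i < s.length := by simp at hi; omega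
    have hchar : (s.drop j)[i] = s[j + i] := by
      rw [List.getElem_drop]
    conv_lhs => rw [pyALoop.eq_def]
    conv_rhs => rw [pyALoop.eq_def]
    rw [dif_pos hji, dif_pos hi]
    dsimp only
    by_cases hpar : s[j + i] = '('
    · rw [if_pos hpar, if_pos (hchar.trans hpar)]
      have hstack : stack.map (· + j) ++ [j + i] = (stack ++ [i]).map (· + j) := by
        simp [Nat.add_comm]
      rw [hstack]
      have hlen : ((stack ++ [i]).map (· + j)).length = (stack ++ [i]).length := by simp
      rw [hlen]
      have hcur : (if (stack ++ [i]).length = 1 then some (j + i) else cur.map (· + j)) =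
          (if (stack ++ [i]).length = 1 then some i else cur).map (· + j) := by
        split <;> simp [Nat.add_comm]
      rw [hcur]
      rw [show j + i + 1 = j + (i + 1) by omega]
      exact ih (i + 1) _ _ (by omega)
    rw [if_neg hpar, if_neg (fun hc => hpar (hchar.symm.trans hc))]
    by_cases hclo : s[j + i] = ')'
    · rw [if_pos hclo, if_pos (hchar.trans hclo)]
      by_cases hemp : stack.isEmpty
      · rw [if_pos (by simpa using hemp), if_pos hemp]
        rw [show j + i + 1 = j + (i + 1) by omega]
        exact ih (i + 1) _ _ (by omega)
      rw [if_neg (by simpa using hemp), if_neg hemp]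
      have hdl : (stack.map (· + j)).dropLast = stack.dropLast.map (· + j) := by
        exact List.map_dropLast.symm
      rw [hdl]
      have hdllen : (stack.dropLast.map (· + j)).length = stack.dropLast.length := by simp
      rw [hdllen]
      by_cases hlen0 : stack.dropLast.length = 0
      · rw [if_pos hlen0, if_pos hlen0]
        have hnil : stack.dropLast = [] := List.length_eq_zero_iff.mp hlen0
        rw [hnil]
        cases cur with
        | none =>
          rw [show j + i + 1 = j + (i + 1) by omega]
          exact ih (i + 1) _ _ (by omega)
        | some st =>
          simp only [Option.map_some]
          have hq : (if e = true then
              PySem.Chars.splitOn (PySem.List.slice s (some ((st + j + 1 : Nat) : Int)) (some ((j + i : Nat) : Int))) pvSep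
            else
              PySem.Chars.splitOn (PySem.List.slice s (some ((st + j : Nat) : Int)) (some ((j + i + 1 : Nat) : Int))) pvSep) =
            (if e = true then
              PySem.Chars.splitOn (PySem.List.slice (s.drop j) (some ((st + 1 : Nat) : Int)) (some ((i : Nat) : Int))) pvSep
            else
              PySem.Chars.splitOn (PySem.List.slice (s.drop j) (some ((st : Nat) : Int)) (some ((i + 1 : Nat) : Int))) pvSep) := by
            split
            · rw [pvSlice_shift s j (st + 1) i, show j + (st + 1) = st + j + 1 by omega]
            · rw [pvSlice_shift s j st (i + 1), show j + st = st + j by omega,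
                show j + (i + 1) = j + i + 1 by omega]
          rw [hq]
          rw [show j + i + 1 = j + (i + 1) by omega]
          rw [pvALoop_factor s e, pvALoop_factor (s.drop j) e]
          have hih := ih (i + 1) [] none (by omega)
          simp only [List.map_nil, Option.map_none] at hih
          simp only [List.map_nil]
          rw [hih]
      · rw [if_neg hlen0, if_neg hlen0]
        rw [show j + i + 1 = j + (i + 1) by omega]
        exact ih (i + 1) _ _ (by omega)
    · rw [if_neg hclo, if_neg (fun hc => hclo (hchar.symm.trans hc))]
      rw [show j + i + 1 = j + (i + 1) by omega]
      exact ih (i + 1) _ _ (by omega)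

theorem pvALoop_resume (s : List Char) (e : Bool) (j : Nat) :
    pyALoop s e j [] none [] = pyA (s.drop j) e := by
  have h := pvALoop_shift s e j s.length 0 [] none (by omega)
  simp only [List.map_nil, Option.map_none, Nat.add_zero] at h
  rw [h, pyA.eq_def]


/-- lockstep: A's loop up to the first top-level close agrees with B's scanner -/
theorem pvL4 (s : List Char) (e : Bool) :
    ∀ (k i : Nat) (stack : List Nat) (cur : Option Nat) (subs : List (List Char)),
      s.length ≤ i + k → (stack ≠ [] → cur.isSome) →
      pyALoop s e i stack cur subs =
        (match scanB s e i stack.length cur with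
         | none => subs
         | some (p, sub, ic) => pyALoop s e (ic + 1) [] none (subs ++ (p ++ pyA sub true))) := by
  intro k
  induction k with
  | zero =>
    intro i stack cur subs hk hinv
    conv_lhs => rw [pyALoop.eq_def]
    rw [scanB.eq_def]
    rw [dif_neg (by omega), dif_neg (by omega)]
  | succ n ih =>
    intro i stack cur subs hk hinv
    by_cases hi : i < s.length
    case neg =>
      conv_lhs => rw [pyALoop.eq_def]
      rw [scanB.eq_def]
      rw [dif_neg hi, dif_neg hi]
    conv_lhs => rw [pyALoop.eq_def]
    rw [scanB.eq_def]
    rw [dif_pos hi, dif_pos hi]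
    dsimp only
    by_cases hpar : s[i] = '('
    · rw [if_pos hpar, if_pos hpar]
      have hlen : (stack ++ [i]).length = stack.length + 1 := by simp
      rw [hlen]
      have hcur : (if stack.length + 1 = 1 then some i else cur) =
          (if stack.length = 0 then some i else cur) := by
        by_cases h0 : stack.length = 0
        · rw [if_pos (by omega), if_pos h0]
        · rw [if_neg (by omega), if_neg h0]
      rw [hcur]
      have hinv' : stack ++ [i] ≠ [] → (if stack.length = 0 then some i else cur).isSome := by
        intro _
        by_cases h0 : stack.length = 0
        · rw [if_pos h0]; rfl
        · rw [if_neg h0]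
          exact hinv (fun hnil => h0 (by rw [hnil]; rfl))
      have h := ih (i + 1) (stack ++ [i]) (if stack.length = 0 then some i else cur) subs (by omega) hinv'
      rw [hlen] at h
      exact h
    rw [if_neg hpar, if_neg hpar]
    by_cases hclo : s[i] = ')'
    · rw [if_pos hclo]
      by_cases hemp : stack.isEmpty
      · rw [if_pos hemp]
        have hl0 : stack.length = 0 := by simpa [List.isEmpty_iff_length_eq_zero] using hemp
        rw [if_neg (by simp [hl0])]
        exact ih (i + 1) stack cur subs (by omega) hinv
      · rw [if_neg hemp]
        have hne : stack ≠ [] := by simpa [List.isEmpty_iff] using hemp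
        have hl : stack.length ≠ 0 := fun h0 => hne (List.length_eq_zero_iff.mp h0)
        have hcond : s[i] = ')' ∧ stack.length ≠ 0 := ⟨hclo, hl⟩
        rw [if_pos hcond]
        have hdl : stack.dropLast.length = stack.length - 1 := by simp
        by_cases hlen0 : stack.dropLast.length = 0
        · have hc2 : stack.length - 1 = 0 := by omega
          rw [if_pos hlen0, if_pos hc2]
          obtain ⟨st, hst⟩ := Option.isSome_iff_exists.mp (hinv hne)
          subst hst
          dsimp only
          simp only [pyA]
          have hnil : stack.dropLast = [] := List.length_eq_zero_iff.mp hlen0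
          rw [hnil]
          simp only [PySem.List.pyGet?_neg_one]
          have hqne : (if e = true then
              PySem.Chars.splitOn (PySem.List.slice s (some ((st + 1 : Nat) : Int)) (some ((i : Nat) : Int))) pvSep
            else
              PySem.Chars.splitOn (PySem.List.slice s (some ((st : Nat) : Int)) (some ((i + 1 : Nat) : Int))) pvSep) ≠ [] := by
            split
            · exact pvSplitOn_ne_nil _ _
            · exact pvSplitOn_ne_nil _ _
          rw [pvGetLast_append_ne_nil subs _ hqne]
          rw [List.append_assoc]
        · have hc2 : ¬ (stack.length - 1 = 0) := by omega
          rw [if_neg hlen0, if_neg hc2]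
          cases cur with
          | none =>
            exact absurd (hinv hne) (by simp)
          | some st =>
            have h := ih (i + 1) stack.dropLast (some st) subs (by omega) (fun _ => rfl)
            rw [hdl] at h
            exact h
    · rw [if_neg hclo, if_neg (by intro hc; exact hclo hc.1)]
      exact ih (i + 1) stack cur subs (by omega) hinv

theorem pvMain : ∀ (n : Nat) (s : List Char), s.length ≤ n → ∀ (e : Bool), pyA s e = pvF s e := by
  intro n
  induction n using Nat.strong_induction_on with
  | _ n ih =>
    intro s hs e
    rw [pyA.eq_def]
    rw [pvL4 s e s.length 0 [] none [] (by omega) (by simp)]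
    simp only [List.length_nil]
    cases hscan : scanB s e 0 0 none with
    | none => dsimp only; rw [pvF_none hscan]
    | some t =>
      obtain ⟨p, sub, ic⟩ := t
      obtain ⟨hic, hsub⟩ := pvScanB_spec0 s e p sub ic hscan
      dsimp only
      rw [List.nil_append]
      rw [pvALoop_factor s e, pvALoop_resume s e (ic + 1)]
      rw [pvF_some hscan]
      have hslice : PySem.List.slice s (some ((ic : Int) + 1)) none = s.drop (ic + 1) := by
        rw [show ((ic : Int) + 1) = ((ic + 1 : Nat) : Int) by push_cast; ring,
          PySem.List.slice_from_natCast]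
      rw [hslice]
      rw [ih (n - 1) (by omega) sub (by omega) true]
      rw [ih (n - 1) (by omega) (s.drop (ic + 1)) (by simp only [List.length_drop]; omega) e]

-- ===== VERDICT (by name: the statement is the Claim_ definition above) =====
theorem break_into_subqueries_spec : Claim_equal_break_into_subqueries := by
  intro full_query exclude_brackets _
  unfold Spec_break_into_subqueries break_into_subqueries break_into_subqueries_alt
  rw [pvRunB_eq]
  rw [pvMain full_query.toList.length full_query.toList (le_refl _) exclude_brackets]
  simp
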